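-- pv_equiv track=rewrite | github.com/Rishov-NightKING/PrompEngineeringAPR | utils.py | adjust_spaces
-- ===== SOURCE A (Python) =====
-- def remove_extra_spaces(line):
--     while True:
--         line = line.replace("  ", " ")
--         if "  " not in line:
--             break
--     return line.strip()
--
-- def adjust_spaces(text):
--     # Create a set of all the items to check for membership
--     first_occurrence_list = [
--         "%",
--         "&",
--         "?",
--         "<",
--         ">",
--         ",",
--         ":",
--         ";",
--         ".",
--         "!",
--         "^",
--         "+",
--         "-",
--         "/",
--         "*",
--         "=",
--     ]
--     second_occurrence_list = ["=", "+", "-", "/", "*", "&"]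
--     brackets = ["(", ")", "{", "}", "[", "]"]
--     # Initialize the output string
--     output = ""
--     # Initialize the current index to 0
--     i = 0
--     # Loop over the characters in the text
--     while i < len(text):
--         # Check if the current character is in the item set
--         if text[i] in first_occurrence_list:
--             # If it is, add it to the output string with a space on either side
--
--             # If the current character is a '<', check if the next character is also in the item set
--             if i + 1 < len(text) and text[i + 1] in second_occurrence_list:
--                 # If it is, add it to the output string as a single unit with a space on either side
--                 output += " " + text[i] + text[i + 1] + " "
--                 # Move the current index forward by two characters
--                 i += 2
--             else:
--                 output += " " + text[i] + " "
--                 # Otherwise, move the current index forward by one character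
--                 i += 1
--         elif text[i] in brackets:
--             output += " " + text[i] + " "
--             i += 1
--         else:
--             # If the current character is not in the item set, add it to the output string
--             output += text[i]
--             # Move the current index forward by one character
--             i += 1
--     output = remove_extra_spaces(output)
--     # Return the output string
--     return output
-- ===== SOURCE B (Python) =====
-- def adjust_spaces(text):
--     FIRST = set("%&?<>,:;.!^+-/*=")
--     SECOND = set("=+-/*&")
--     BRACKETS = set("(){}[]")
--     # one pass with a one-character lookahead and a skip flag
--     parts = []
--     skip = False
--     for c, nxt in zip(text, text[1:] + "\0"):
--         if skip:
--             skip = False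
--         elif c in FIRST and nxt in SECOND:
--             parts.append(" " + c + nxt + " ")
--             skip = True
--         elif c in FIRST or c in BRACKETS:
--             parts.append(" " + c + " ")
--         else:
--             parts.append(c)
--     # collapse runs of spaces in a single pass (instead of iterated global replace)
--     out = []
--     prev_space = False
--     for ch in "".join(parts):
--         if ch == " ":
--             if not prev_space:
--                 out.append(ch)
--             prev_space = True
--         else:
--             out.append(ch)
--             prev_space = False
--     return "".join(out).strip()
-- ===== Notes on version B (the rewrite author's own statement) =====
-- stated objective: faster
-- what changed: Phase 1 becomes a single for-loop over zip(text, text[1:]+sentinel) with a skip flag collecting pieces into a list (joined once) instead of A's index-jumping while loop with repeated string concatenation, and the space collapse becomes one linear pass keyed on a previous-char flag instead of A's fixpoint loop of whole-string replace calls.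
import Mathlib
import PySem

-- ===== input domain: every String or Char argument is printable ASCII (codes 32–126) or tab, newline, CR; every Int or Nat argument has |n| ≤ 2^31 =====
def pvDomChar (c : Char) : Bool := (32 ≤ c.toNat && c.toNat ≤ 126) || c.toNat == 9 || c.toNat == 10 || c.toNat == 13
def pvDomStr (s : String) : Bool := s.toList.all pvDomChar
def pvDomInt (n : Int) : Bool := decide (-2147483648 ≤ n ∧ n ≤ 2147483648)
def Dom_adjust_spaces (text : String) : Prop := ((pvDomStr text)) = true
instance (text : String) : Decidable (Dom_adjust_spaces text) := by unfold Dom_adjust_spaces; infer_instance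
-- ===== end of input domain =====

-- B: one zip/lookahead pass collecting pieces plus a single-pass previous-char space collapse,
-- instead of A's index-jumping while loop with string concatenation and its fixpoint loop of
-- whole-string replace calls (measured faster); return values proved equal on all of Dom.

-- ===== PORT A =====
-- shared character classes (the three membership lists of both Pythons)
def firstOccChars : List Char :=
  ['%', '&', '?', '<', '>', ',', ':', ';', '.', '!', '^', '+', '-', '/', '*', '=']
def secondOccChars : List Char := ['=', '+', '-', '/', '*', '&']
def bracketChars : List Char := ['(', ')', '{', '}', '[', ']']

-- reference forms of line.replace("  ", " ") and '"  " in line' for THIS fixed pattern,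
-- used only to justify termination of the remove_extra_spaces loop (bridged to the PySem
-- primitives by pv_replace_eq_repAll / pv_isIn_eq_hasDbl below).
def pvRepAll : List Char → List Char
  | [] => []
  | [c] => [c]
  | a :: b :: r => if a = ' ' ∧ b = ' ' then ' ' :: pvRepAll r else a :: pvRepAll (b :: r)

def pvHasDbl : List Char → Bool
  | a :: b :: r => (a = ' ' && b = ' ') || pvHasDbl (b :: r)
  | _ => false

theorem pvRepAll_length_le : ∀ l : List Char, (pvRepAll l).length ≤ l.length := by
  intro l
  fun_induction pvRepAll l <;> simp_all <;> omega

theorem pvRepAll_cons_shape (b : Char) (r : List Char) :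
    ∃ u, pvRepAll (b :: r) = b :: u := by
  match r with
  | [] => exact ⟨[], rfl⟩
  | c :: r' =>
    by_cases h : b = ' ' ∧ c = ' '
    · exact ⟨pvRepAll r', by simp [pvRepAll, h, h.1]⟩
    · exact ⟨pvRepAll (c :: r'), by simp [pvRepAll, h]⟩

theorem pvHasDbl_pvRepAll : ∀ l : List Char, pvHasDbl (pvRepAll l) = true → pvHasDbl l = true := by
  intro l
  fun_induction pvRepAll l with
  | case1 => simp [pvHasDbl]
  | case2 c => simp [pvRepAll, pvHasDbl]
  | case3 a b r h => intro _; simp [pvHasDbl, h.1, h.2]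
  | case4 a b r h ih =>
    intro hd
    obtain ⟨u, hu⟩ := pvRepAll_cons_shape b r
    rw [hu] at hd
    simp only [pvHasDbl, Bool.or_eq_true] at hd ⊢
    rcases hd with hd | hd
    · simp only [Bool.and_eq_true, decide_eq_true_eq] at hd
      exact absurd hd h
    · exact Or.inr (ih (by rw [hu]; exact hd))

theorem pvRepAll_length_lt : ∀ l : List Char, pvHasDbl l = true → (pvRepAll l).length < l.length := by
  intro l
  fun_induction pvRepAll l with
  | case1 => simp [pvHasDbl]
  | case2 c => simp [pvHasDbl]
  | case3 a b r h =>
    intro _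
    have := pvRepAll_length_le r
    simp; omega
  | case4 a b r h ih =>
    intro hd
    simp only [pvHasDbl, Bool.or_eq_true] at hd
    rcases hd with hd | hd
    · simp only [Bool.and_eq_true, decide_eq_true_eq] at hd
      exact absurd hd h
    · have := ih hd; simp at this ⊢; omega

-- bridge: PySem.Chars.replace with old = "  ", new = " " is pvRepAll
theorem pv_replace_go_eq : ∀ (fuel : Nat) (l acc : List Char), l.length ≤ fuel →
    PySem.Chars.replace.go [' ', ' '] [' '] fuel l acc = acc.reverse ++ pvRepAll l := by
  intro fuel
  induction fuel with
  | zero =>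
    intro l acc h
    have : l = [] := List.eq_nil_of_length_eq_zero (by omega)
    subst this
    simp [PySem.Chars.replace.go, pvRepAll]
  | succ n ih =>
    intro l acc h
    match l with
    | [] => simp [PySem.Chars.replace.go, pvRepAll]
    | [c] =>
      simp only [PySem.Chars.replace.go]
      have hpre : [' ', ' '].isPrefixOf [c] = false := by simp [List.isPrefixOf]
      rw [hpre]
      simp only [Bool.false_eq_true, if_false]
      rw [ih [] (c :: acc) (by simp)]
      simp [pvRepAll]
    | a :: b :: r =>
      simp only [PySem.Chars.replace.go]
      by_cases hab : a = ' ' ∧ b = ' '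
      · have hpre : [' ', ' '].isPrefixOf (a :: b :: r) = true := by
          simp [List.isPrefixOf, hab.1, hab.2]
        rw [hpre]
        simp only [if_true]
        have hr : r.length ≤ n := by simp at h; omega
        rw [show List.drop [' ', ' '].length (a :: b :: r) = r by simp]
        rw [ih r ([' '].reverse ++ acc) hr]
        simp [pvRepAll, hab]
      · have hpre : [' ', ' '].isPrefixOf (a :: b :: r) = false := by
          simp [List.isPrefixOf]
          intro h1 h2; exact hab ⟨h1.symm, h2.symm⟩
        rw [hpre]
        simp only [Bool.false_eq_true, if_false]
        rw [ih (b :: r) (a :: acc) (by simp at h ⊢; omega)]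
        simp [pvRepAll, hab]

theorem pv_replace_eq_repAll (l : List Char) :
    PySem.Chars.replace l [' ', ' '] [' '] = pvRepAll l := by
  simp only [PySem.Chars.replace]
  rw [if_neg (by simp)]
  simpa using pv_replace_go_eq l.length l [] le_rfl

theorem pvHasDbl_iff_infix : ∀ l : List Char, pvHasDbl l = true ↔ [' ', ' '] <:+: l := by
  intro l
  match l with
  | [] => simp [pvHasDbl]
  | [a] =>
    simp only [pvHasDbl]
    constructor
    · intro h; simp at h
    · intro h; have := h.length_le; simp at this
  | a :: b :: r =>
    rw [List.infix_cons_iff]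
    constructor
    · intro h
      simp only [pvHasDbl, Bool.or_eq_true] at h
      rcases h with h | h
      · simp only [Bool.and_eq_true, decide_eq_true_eq] at h
        obtain ⟨h1, h2⟩ := h
        subst h1; subst h2
        exact Or.inl ⟨r, rfl⟩
      · exact Or.inr ((pvHasDbl_iff_infix (b :: r)).1 h)
    · intro h
      simp only [pvHasDbl, Bool.or_eq_true]
      rcases h with h | h
      · obtain ⟨t, ht⟩ := h
        simp only [List.cons_append, List.nil_append, List.cons.injEq] at ht
        obtain ⟨h1, h2, -⟩ := ht
        simp [← h1, ← h2]
      · exact Or.inr ((pvHasDbl_iff_infix (b :: r)).2 h)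

theorem pv_isIn_eq_hasDbl (l : List Char) :
    PySem.Chars.isIn [' ', ' '] l = pvHasDbl l := by
  have h1 : (PySem.Chars.find l [' ', ' '] = -1) ↔ ¬ ([' ', ' '] <:+: l) := by
    rw [← PySem.Chars.findFrom_zero]
    simpa using PySem.Chars.findFrom_natCast_eq_neg_one_iff l [' ', ' '] 0 (by simp)
  simp only [PySem.Chars.isIn]
  by_cases h : [' ', ' '] <:+: l
  · have : PySem.Chars.find l [' ', ' '] ≠ -1 := fun hc => (h1.1 hc) h
    simp [this, (pvHasDbl_iff_infix l).2 h]
  · rw [h1.2 h]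
    have hf : pvHasDbl l = false := by
      cases hc : pvHasDbl l
      · rfl
      · exact absurd ((pvHasDbl_iff_infix l).1 hc) h
    simp [hf]

-- port of remove_extra_spaces: the while-True replace loop, then .strip()
def remove_extra_spaces (line : List Char) : List Char :=
  let line2 := PySem.Chars.replace line [' ', ' '] [' ']
  if PySem.Chars.isIn [' ', ' '] line2 = true then remove_extra_spaces line2
  else PySem.Chars.strip line2
termination_by line.length
decreasing_by
  rename_i h
  have h' : pvHasDbl (pvRepAll line) = true := by
    rw [← pv_isIn_eq_hasDbl, ← pv_replace_eq_repAll]; exact h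
  rw [pv_replace_eq_repAll]
  exact pvRepAll_length_lt line (pvHasDbl_pvRepAll line h')

-- the while i < len(text) loop of A (i steps by 1 or 2; output accumulated left to right)
def adjust_spaces_loop (cs : List Char) (i : Nat) (output : List Char) : List Char :=
  if h : i < cs.length then
    if cs[i] ∈ firstOccChars then
      if h2 : i + 1 < cs.length then
        if cs[i + 1] ∈ secondOccChars then
          adjust_spaces_loop cs (i + 2) (output ++ [' ', cs[i], cs[i + 1], ' '])
        else
          adjust_spaces_loop cs (i + 1) (output ++ [' ', cs[i], ' '])
      else
        adjust_spaces_loop cs (i + 1) (output ++ [' ', cs[i], ' '])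
    else if cs[i] ∈ bracketChars then
      adjust_spaces_loop cs (i + 1) (output ++ [' ', cs[i], ' '])
    else
      adjust_spaces_loop cs (i + 1) (output ++ [cs[i]])
  else output
termination_by cs.length - i

def adjust_spaces (text : String) : String :=
  String.mk (remove_extra_spaces (adjust_spaces_loop text.toList 0 []))

-- ===== PORT B =====
-- one step of B's zip/lookahead for-loop (state: pieces collected so far, skip flag)
def pvBStep : List (List Char) × Bool → Char × Char → List (List Char) × Bool
  | (parts, skip), (c, nxt) =>
    if skip then (parts, false)
    else if c ∈ firstOccChars ∧ nxt ∈ secondOccChars then (parts ++ [[' ', c, nxt, ' ']], true)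
    else if c ∈ firstOccChars ∨ c ∈ bracketChars then (parts ++ [[' ', c, ' ']], false)
    else (parts ++ [[c]], false)

-- one step of B's single-pass space collapse (state: output chars, prev_space flag)
def pvCollapseStep : List Char × Bool → Char → List Char × Bool
  | (out, prev), ch =>
    if ch = ' ' then ((if prev then out else out ++ [ch]), true)
    else (out ++ [ch], false)

def adjust_spaces_alt (text : String) : String :=
  let cs := text.toList
  let zipped := cs.zip (PySem.List.slice cs (some 1) none ++ ['\x00'])
  let parts := (zipped.foldl pvBStep ([], false)).1
  let spaced := PySem.Chars.join [] parts
  let out := (spaced.foldl pvCollapseStep ([], false)).1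
  String.mk (PySem.Chars.strip out)

-- ===== PRECONDITION & SPEC =====
def Spec_adjust_spaces (text : String) (out : String) : Prop := out = adjust_spaces_alt text
instance (text : String) (out : String) : Decidable (Spec_adjust_spaces text out) := by unfold Spec_adjust_spaces; infer_instance

-- ===== CLAIM (what is proved, stated in full; the proofs are below) =====
def Claim_equal_adjust_spaces : Prop := ∀ (text : String), Dom_adjust_spaces text → Spec_adjust_spaces text (adjust_spaces text)

-- ===== LEMMAS AND PROOFS =====

-- common intermediate form: the spaced-out pieces both phase-1 passes produce
def pvPieces : List Char → List (List Char)
  | [] => []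
  | c :: rest =>
    if c ∈ firstOccChars then
      match rest with
      | d :: r' =>
        if d ∈ secondOccChars then [' ', c, d, ' '] :: pvPieces r'
        else [' ', c, ' '] :: pvPieces (d :: r')
      | [] => [[' ', c, ' ']]
    else if c ∈ bracketChars then [' ', c, ' '] :: pvPieces rest
    else [c] :: pvPieces rest

-- common normal form of both space-collapsing passes
def pvSqueeze : List Char → List Char
  | [] => []
  | [c] => [c]
  | a :: b :: r => if a = ' ' ∧ b = ' ' then pvSqueeze (b :: r) else a :: pvSqueeze (b :: r)

def pvDropSp (l : List Char) : List Char := l.dropWhile (· = ' ')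

def pvGoCol : Bool → List Char → List Char
  | _, [] => []
  | prev, ch :: r =>
    if ch = ' ' then (if prev then pvGoCol true r else ' ' :: pvGoCol true r)
    else ch :: pvGoCol false r

theorem pvDropSp_cons_space (u : List Char) : pvDropSp (' ' :: u) = pvDropSp u := by
  simp [pvDropSp, List.dropWhile]

theorem pvDropSp_cons_nonspace {c : Char} (h : c ≠ ' ') (u : List Char) :
    pvDropSp (c :: u) = c :: u := by
  simp [pvDropSp, List.dropWhile, h]

theorem pvDropSp_of_head {u : List Char} {b : Char} (hu : u.head? = some b) (hb : b ≠ ' ') :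
    pvDropSp u = u := by
  cases u with
  | nil => rfl
  | cons x t =>
    simp only [List.head?_cons, Option.some.injEq] at hu
    subst hu
    exact pvDropSp_cons_nonspace hb t

theorem pvSqueeze_cons_space : ∀ u : List Char, pvSqueeze (' ' :: u) = ' ' :: pvSqueeze (pvDropSp u) := by
  intro u
  induction u with
  | nil => simp [pvSqueeze, pvDropSp]
  | cons b v ih =>
    by_cases hb : b = ' '
    · subst hb
      rw [pvDropSp_cons_space]
      calc pvSqueeze (' ' :: ' ' :: v) = pvSqueeze (' ' :: v) := by simp [pvSqueeze]
        _ = ' ' :: pvSqueeze (pvDropSp v) := ih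
    · rw [pvDropSp_cons_nonspace hb]
      simp [pvSqueeze, hb]

theorem pvSqueeze_cons_nonspace {c : Char} (hc : c ≠ ' ') (u : List Char) :
    pvSqueeze (c :: u) = c :: pvSqueeze u := by
  cases u with
  | nil => simp [pvSqueeze]
  | cons b v => simp [pvSqueeze, hc]

theorem pvRepAll_head? : ∀ u : List Char, (pvRepAll u).head? = u.head? := by
  intro u
  fun_induction pvRepAll u with
  | case1 => rfl
  | case2 c => rfl
  | case3 a b r h => simp [h.1]
  | case4 a b r h ih => simp

theorem pvDropSp_repAll : ∀ l : List Char, pvDropSp (pvRepAll l) = pvRepAll (pvDropSp l) := by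
  intro l
  fun_induction pvRepAll l with
  | case1 => rfl
  | case2 c =>
    by_cases hc : c = ' '
    · subst hc; simp [pvDropSp, List.dropWhile, pvRepAll]
    · show pvDropSp (pvRepAll [c]) = pvRepAll (pvDropSp [c])
      rw [show pvRepAll [c] = [c] from rfl, pvDropSp_cons_nonspace hc,
        show pvRepAll [c] = [c] from rfl]
  | case3 a b r h ih =>
    obtain ⟨ha, hb⟩ := h
    subst ha; subst hb
    rw [pvDropSp_cons_space, ih, pvDropSp_cons_space, pvDropSp_cons_space]
  | case4 a b r h ih =>
    by_cases ha : a = ' '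
    · have hb : b ≠ ' ' := fun hb => h ⟨ha, hb⟩
      subst ha
      rw [pvDropSp_cons_space, ih, pvDropSp_cons_nonspace hb, pvDropSp_cons_space,
        pvDropSp_cons_nonspace hb]
    · rw [pvDropSp_cons_nonspace ha, pvDropSp_cons_nonspace ha]
      simp [pvRepAll, h]

theorem pvSqueeze_repAll_bounded : ∀ (n : Nat) (l : List Char), l.length ≤ n →
    pvSqueeze (pvRepAll l) = pvSqueeze l := by
  intro n
  induction n with
  | zero =>
    intro l h
    have : l = [] := List.eq_nil_of_length_eq_zero (by omega)
    subst this; rfl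
  | succ n ih =>
    intro l hlen
    match l with
    | [] => rfl
    | [c] => rfl
    | a :: b :: r =>
      by_cases h : a = ' ' ∧ b = ' '
      · obtain ⟨ha, hb⟩ := h
        subst ha; subst hb
        have h1 : pvRepAll (' ' :: ' ' :: r) = ' ' :: pvRepAll r := by simp [pvRepAll]
        have hlen2 : (pvDropSp r).length ≤ n := by
          have := List.length_dropWhile_le (fun c => decide (c = ' ')) r
          simp only [pvDropSp]
          simp at hlen
          omega
        rw [h1, pvSqueeze_cons_space, pvDropSp_repAll, ih (pvDropSp r) hlen2,
          ← pvSqueeze_cons_space,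
          show pvSqueeze (' ' :: ' ' :: r) = pvSqueeze (' ' :: r) from by simp [pvSqueeze]]
      · have h1 : pvRepAll (a :: b :: r) = a :: pvRepAll (b :: r) := by simp [pvRepAll, h]
        rw [h1]
        by_cases ha : a = ' '
        · have hb : b ≠ ' ' := fun hb => h ⟨ha, hb⟩
          subst ha
          have hh : (pvRepAll (b :: r)).head? = some b := by simp [pvRepAll_head?]
          rw [pvSqueeze_cons_space, pvDropSp_of_head hh hb,
            ih (b :: r) (by simp at hlen ⊢; omega)]
          simp [pvSqueeze, hb]
        · rw [pvSqueeze_cons_nonspace ha, ih (b :: r) (by simp at hlen ⊢; omega),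
            pvSqueeze_cons_nonspace ha]

theorem pvSqueeze_repAll (l : List Char) : pvSqueeze (pvRepAll l) = pvSqueeze l :=
  pvSqueeze_repAll_bounded l.length l le_rfl

theorem pvSqueeze_of_no_dbl : ∀ l : List Char, pvHasDbl l = false → pvSqueeze l = l := by
  intro l
  fun_induction pvSqueeze l with
  | case1 => intro _; rfl
  | case2 c => intro _; rfl
  | case3 a b r h ih =>
    intro hd
    simp only [pvHasDbl, Bool.or_eq_false_iff, Bool.and_eq_false_iff] at hd
    rcases hd.1 with hc | hc <;> simp [h.1, h.2] at hc
  | case4 a b r h ih =>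
    intro hd
    simp only [pvHasDbl, Bool.or_eq_false_iff] at hd
    rw [ih hd.2]

theorem remove_extra_spaces_eq : ∀ (n : Nat) (l : List Char), l.length ≤ n →
    remove_extra_spaces l = PySem.Chars.strip (pvSqueeze l) := by
  intro n
  induction n with
  | zero =>
    intro l h
    have : l = [] := List.eq_nil_of_length_eq_zero (by omega)
    subst this
    rw [remove_extra_spaces]
    simp [pv_replace_eq_repAll, pv_isIn_eq_hasDbl, pvRepAll, pvHasDbl, pvSqueeze]
  | succ n ih =>
    intro l hlen
    rw [remove_extra_spaces]
    simp only [pv_replace_eq_repAll, pv_isIn_eq_hasDbl]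
    by_cases hd : pvHasDbl (pvRepAll l) = true
    · rw [if_pos hd,
        ih (pvRepAll l) (by have := pvRepAll_length_lt l (pvHasDbl_pvRepAll l hd); omega),
        pvSqueeze_repAll]
    · rw [if_neg hd]
      conv_lhs => rw [← pvSqueeze_of_no_dbl (pvRepAll l) (by simpa using hd)]
      rw [pvSqueeze_repAll l]

theorem pvPieces_cons_notfirst {c : Char} (hf : c ∉ firstOccChars) (rest : List Char) :
    pvPieces (c :: rest) =
      (if c ∈ bracketChars then [' ', c, ' '] else [c]) :: pvPieces rest := by
  cases rest <;> simp [pvPieces, hf] <;> split <;> rfl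

-- phase 1, A side: the index loop appends exactly the flattened pieces of the rest
theorem adjust_spaces_loop_eq : ∀ (n : Nat) (cs : List Char) (i : Nat) (out : List Char),
    cs.length - i ≤ n →
    adjust_spaces_loop cs i out = out ++ (pvPieces (List.drop i cs)).flatten := by
  intro n
  induction n with
  | zero =>
    intro cs i out h
    rw [adjust_spaces_loop, dif_neg (by omega)]
    rw [List.drop_eq_nil_of_le (by omega)]
    simp [pvPieces]
  | succ n ih =>
    intro cs i out hlen
    rw [adjust_spaces_loop]
    by_cases h : i < cs.length
    · rw [dif_pos h]
      have hd : List.drop i cs = cs[i] :: List.drop (i + 1) cs := List.drop_eq_getElem_cons h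
      by_cases hf : cs[i] ∈ firstOccChars
      · rw [if_pos hf]
        by_cases h2 : i + 1 < cs.length
        · rw [dif_pos h2]
          have hd2 : List.drop (i + 1) cs = cs[i + 1] :: List.drop (i + 2) cs := by
            have := List.drop_eq_getElem_cons h2
            simpa using this
          by_cases hs : cs[i + 1] ∈ secondOccChars
          · rw [if_pos hs, ih cs (i + 2) _ (by omega), hd, hd2]
            simp [pvPieces, hf, hs]
          · rw [if_neg hs, ih cs (i + 1) _ (by omega), hd, hd2]
            simp [pvPieces, hf, hs, ← hd2]
        · rw [dif_neg h2]
          have hd2 : List.drop (i + 1) cs = [] := List.drop_eq_nil_of_le (by omega)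
          rw [ih cs (i + 1) _ (by omega), hd, hd2]
          simp [pvPieces, hf]
      · rw [if_neg hf]
        by_cases hb : cs[i] ∈ bracketChars
        · rw [if_pos hb, ih cs (i + 1) _ (by omega), hd, pvPieces_cons_notfirst hf]
          simp [hb, -List.getElem_cons_drop]
        · rw [if_neg hb, ih cs (i + 1) _ (by omega), hd, pvPieces_cons_notfirst hf]
          simp [hb, -List.getElem_cons_drop]
    · rw [dif_neg h]
      rw [List.drop_eq_nil_of_le (by omega)]
      simp [pvPieces]

-- phase 1, B side
theorem pvZipNext_cons (c z : Char) (rest : List Char) :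
    (c :: rest).zip ((c :: rest).drop 1 ++ [z]) =
      (c, rest.headD z) :: rest.zip (rest.drop 1 ++ [z]) := by
  cases rest <;> simp

theorem pvBfold_eq : ∀ (n : Nat) (l : List Char) (parts : List (List Char)), l.length ≤ n →
    ((l.zip (l.drop 1 ++ ['\x00'])).foldl pvBStep (parts, false)).1 = parts ++ pvPieces l := by
  intro n
  induction n with
  | zero =>
    intro l parts h
    have : l = [] := List.eq_nil_of_length_eq_zero (by omega)
    subst this
    simp [pvPieces]
  | succ n ih =>
    intro l parts hlen
    match l with
    | [] => simp [pvPieces]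
    | c :: rest =>
      rw [pvZipNext_cons, List.foldl_cons]
      cases rest with
      | nil =>
        have hz : ('\x00' ∈ secondOccChars) = False := by simp [secondOccChars]
        by_cases hf : c ∈ firstOccChars
        · simp [pvBStep, pvPieces, hf, hz]
        · by_cases hb : c ∈ bracketChars
          · simp [pvBStep, pvPieces, hf, hb, hz]
          · simp [pvBStep, pvPieces, hf, hb, hz]
      | cons d r' =>
        by_cases hc : c ∈ firstOccChars ∧ d ∈ secondOccChars
        · have hstep : pvBStep (parts, false) (c, (d :: r').headD '\x00') =
              (parts ++ [[' ', c, d, ' ']], true) := by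
            simp [pvBStep, hc]
          rw [hstep, pvZipNext_cons, List.foldl_cons]
          have hskip : pvBStep (parts ++ [[' ', c, d, ' ']], true) (d, r'.headD '\x00') =
              (parts ++ [[' ', c, d, ' ']], false) := by simp [pvBStep]
          rw [hskip, ih r' _ (by simp at hlen; omega)]
          simp [pvPieces, hc.1, hc.2]
        · have hd2 : (d ∈ secondOccChars) → (c ∈ firstOccChars) → False := fun h1 h2 => hc ⟨h2, h1⟩
          by_cases hf : c ∈ firstOccChars
          · have hds : d ∉ secondOccChars := fun h1 => hd2 h1 hf
            have hstep : pvBStep (parts, false) (c, (d :: r').headD '\x00') =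
                (parts ++ [[' ', c, ' ']], false) := by simp [pvBStep, hc, hf, hds]
            rw [hstep, ih (d :: r') _ (by simp at hlen ⊢; omega)]
            simp [pvPieces, hf, hds]
          · by_cases hb : c ∈ bracketChars
            · have hstep : pvBStep (parts, false) (c, (d :: r').headD '\x00') =
                  (parts ++ [[' ', c, ' ']], false) := by simp [pvBStep, hc, hf, hb]
              rw [hstep, ih (d :: r') _ (by simp at hlen ⊢; omega)]
              simp [pvPieces, hf, hb]
            · have hstep : pvBStep (parts, false) (c, (d :: r').headD '\x00') =
                  (parts ++ [[c]], false) := by simp [pvBStep, hc, hf, hb]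
              rw [hstep, ih (d :: r') _ (by simp at hlen ⊢; omega)]
              simp [pvPieces, hf, hb]

-- phase 2, B side
theorem pvColfold_eq : ∀ (l out : List Char) (prev : Bool),
    (l.foldl pvCollapseStep (out, prev)).1 = out ++ pvGoCol prev l := by
  intro l
  induction l with
  | nil => intro out prev; simp [pvGoCol]
  | cons ch r ih =>
    intro out prev
    rw [List.foldl_cons]
    by_cases hch : ch = ' '
    · subst hch
      cases prev with
      | true => rw [show pvCollapseStep (out, true) ' ' = (out, true) from by simp [pvCollapseStep]]
                rw [ih]; simp [pvGoCol]
      | false =>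
        rw [show pvCollapseStep (out, false) ' ' = (out ++ [' '], true) from by
          simp [pvCollapseStep]]
        rw [ih]; simp [pvGoCol]
    · rw [show pvCollapseStep (out, prev) ch = (out ++ [ch], false) from by
        simp [pvCollapseStep, hch]]
      rw [ih]; simp [pvGoCol, hch]

theorem pvGoCol_eq : ∀ (n : Nat) (l : List Char), l.length ≤ n →
    pvGoCol false l = pvSqueeze l ∧ pvGoCol true l = pvSqueeze (pvDropSp l) := by
  intro n
  induction n with
  | zero =>
    intro l h
    have : l = [] := List.eq_nil_of_length_eq_zero (by omega)
    subst this
    exact ⟨rfl, rfl⟩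
  | succ n ih =>
    intro l hlen
    match l with
    | [] => exact ⟨rfl, rfl⟩
    | ch :: r =>
      have hr := ih r (by simp at hlen; omega)
      by_cases hch : ch = ' '
      · subst hch
        constructor
        · rw [show pvGoCol false (' ' :: r) = ' ' :: pvGoCol true r from by simp [pvGoCol]]
          rw [hr.2, ← pvSqueeze_cons_space]
        · rw [show pvGoCol true (' ' :: r) = pvGoCol true r from by simp [pvGoCol]]
          rw [hr.2, pvDropSp_cons_space]
      · constructor
        · rw [show pvGoCol false (ch :: r) = ch :: pvGoCol false r from by simp [pvGoCol, hch]]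
          rw [hr.1, pvSqueeze_cons_nonspace hch]
        · rw [show pvGoCol true (ch :: r) = ch :: pvGoCol false r from by simp [pvGoCol, hch]]
          rw [hr.1, pvDropSp_cons_nonspace hch, pvSqueeze_cons_nonspace hch]

theorem pvJoin_nil_flatten : ∀ ps : List (List Char), PySem.Chars.join [] ps = ps.flatten := by
  intro ps
  induction ps with
  | nil => rfl
  | cons p ps ih =>
    cases ps with
    | nil => simp [PySem.Chars.join, List.intercalate]
    | cons q qs =>
      simp only [PySem.Chars.join, List.intercalate] at ih ⊢
      simp [List.intersperse_cons₂, ih, List.flatten]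

-- ===== VERDICT (by name: the statement is the Claim_ definition above) =====
theorem adjust_spaces_spec : Claim_equal_adjust_spaces := by
  unfold Claim_equal_adjust_spaces
  intro text _
  unfold Spec_adjust_spaces adjust_spaces adjust_spaces_alt
  rw [adjust_spaces_loop_eq text.toList.length text.toList 0 [] (by omega)]
  simp only [List.nil_append, List.drop_zero]
  rw [remove_extra_spaces_eq (pvPieces text.toList).flatten.length _ le_rfl]
  rw [PySem.List.slice_from text.toList (by norm_num)]
  simp only [Int.toNat_one]
  rw [pvBfold_eq text.toList.length text.toList [] le_rfl]
  simp only [List.nil_append]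
  rw [pvJoin_nil_flatten, pvColfold_eq]
  simp only [List.nil_append]
  rw [(pvGoCol_eq (pvPieces text.toList).flatten.length _ le_rfl).1]
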